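-- pv_equiv track=rewrite | github.com/Z1RKON/OrlovVA | lab11/src/z_function.py | z_search
-- ===== SOURCE A (Python) =====
-- def compute_z_function(s: str) -> list[int]:
--     """
--     Вычисляет Z-функцию для строки.
--
--     Алгоритм использует "окно совпадения" [l, r]:
--     - Поддерживаем отрезок с наибольшим r, где s[l:r+1] = s[0:r-l+1]
--     - Для каждой позиции i используем ранее вычисленную информацию
--
--     Args:
--         s: входная строка
--
--     Returns:
--         Массив Z-функции
--
--     Time Complexity: O(n)
--     Space Complexity: O(n)
--     """
--     n = len(s)
--     z = [0] * n
--     z[0] = n  # Z[0] по определению равен длине строки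
--
--     l, r = 0, 0  # Границы "окна совпадения"
--
--     for i in range(1, n):
--         # Если i выходит за правую границу окна, начинаем заново
--         if i > r:
--             l, r = i, i
--             # Расширяем окно вправо пока совпадают символы
--             while r < n and s[r - l] == s[r]:
--                 r += 1
--             z[i] = r - l
--             r -= 1
--         else:
--             # i находится внутри окна [l, r]
--             k = i - l  # Позиция относительно l
--
--             if z[k] < r - i + 1:
--                 # z[k] не доходит до конца окна
--                 z[i] = z[k]
--             else:
--                 # Нужно проверить символы дальше r
--                 l = i
--                 while r < n and s[r - l] == s[r]:
--                     r += 1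
--                 z[i] = r - l
--                 r -= 1
--
--     return z
--
-- def z_search(text: str, pattern: str) -> list[int]:
--     """
--     Поиск всех вхождений паттерна в тексте с помощью Z-функции.
--
--     Метод:
--     1. Объединяем паттерн и текст: "pattern#text"
--     2. Вычисляем Z-функцию для объединённой строки
--     3. Индексы i с z[i] = len(pattern) указывают на начало вхождений в тексте
--
--     Args:
--         text: текст для поиска
--         pattern: паттерн для поиска
--
--     Returns:
--         Список индексов начальных позиций найденных вхождений
--
--     Time Complexity: O(n + m)
--     Space Complexity: O(n + m)
--     """
--     if not pattern or not text:
--         return []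
--
--     m = len(pattern)
--     n = len(text)
--
--     if m > n:
--         return []
--
--     # Объединяем паттерн и текст с разделителем
--     combined = pattern + "#" + text
--     z = compute_z_function(combined)
--
--     results = []
--     # Ищем позиции, где z[i] = len(pattern)
--     for i in range(m + 1, len(combined)):
--         if z[i] == m:
--             results.append(i - m - 1)
--
--     return results
-- ===== SOURCE B (Python) =====
-- def z_search(text: str, pattern: str) -> list[int]:
--     if not pattern or not text or len(pattern) > len(text):
--         return []
--     m = len(pattern)
--     return [i for i in range(len(text) - m + 1) if text[i:i + m] == pattern]
-- ===== Notes on version B (the rewrite author's own statement) =====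
-- stated objective: simpler
-- what changed: Replaced the Z-function-over-'pattern#text' machinery with a direct one-line sliding-window scan comparing each length-m slice of the text to the pattern; this also fixes A's separator bug.
-- intended difference: On inputs where some occurrence of the pattern is immediately followed by the character '#' in the text, A omits exactly those occurrences from its result (its Z-values overshoot past its '#' separator), while B returns the full list of occurrence indices, which is the intended answer. — e.g. on z_search("a#a", "a"): A returns [2], B returns [0, 2]
import Mathlib
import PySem

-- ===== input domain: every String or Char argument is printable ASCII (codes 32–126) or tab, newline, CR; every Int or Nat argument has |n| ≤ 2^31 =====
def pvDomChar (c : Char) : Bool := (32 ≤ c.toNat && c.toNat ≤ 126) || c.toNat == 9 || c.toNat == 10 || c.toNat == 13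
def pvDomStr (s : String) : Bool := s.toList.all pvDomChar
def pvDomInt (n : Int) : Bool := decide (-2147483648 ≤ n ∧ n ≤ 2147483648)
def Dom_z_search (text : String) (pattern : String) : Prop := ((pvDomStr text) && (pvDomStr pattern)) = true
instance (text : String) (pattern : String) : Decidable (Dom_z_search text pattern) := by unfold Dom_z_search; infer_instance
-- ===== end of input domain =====

-- B replaces A's Z-function over "pattern#text" by a direct sliding-window scan of the text;
-- B also returns the occurrences A loses when an occurrence is followed by '#' (see D_ below).

-- ===== PORT A =====
-- the inner `while r < n and s[r-l] == s[r]: r += 1` loop of compute_z_function, with the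
-- fuel `s.length - r` that the guard `r < n` guarantees is sufficient; returns the final r.
-- every Python access s[r-l], s[r] is in range (0 ≤ r-l ≤ r < n), so List.getD is exact.
def zextF (s : List Char) (l : Nat) : Nat → Nat → Nat
  | 0, r => r
  | fuel + 1, r =>
    if r < s.length ∧ s.getD (r - l) 'A' = s.getD r 'A' then zextF s l fuel (r + 1) else r

def zext (s : List Char) (l : Nat) (r : Nat) : Nat := zextF s l (s.length - r) r

-- one iteration of the `for i in range(1, n)` loop of compute_z_function; state (z, l, r)
def zstep (s : List Char) (st : List Nat × Nat × Nat) (i : Nat) : List Nat × Nat × Nat :=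
  let z := st.1; let l := st.2.1; let r := st.2.2
  if r < i then
    let r' := zext s i i
    (z.set i (r' - i), i, r' - 1)
  else
    let k := i - l
    if z.getD k 0 < r - i + 1 then
      (z.set i (z.getD k 0), l, r)
    else
      let r' := zext s i r
      (z.set i (r' - i), i, r' - 1)

-- compute_z_function (the z-values are naturals; stored as Nat, compared with m in z_search)
def computeZ (s : List Char) : List Nat :=
  let n := s.length
  ((List.range' 1 (n - 1)).foldl (zstep s) ((List.replicate n 0).set 0 n, 0, 0)).1

def z_search (text : String) (pattern : String) : List Int :=
  let p := pattern.toList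
  let t := text.toList
  if p = [] ∨ t = [] then []
  else
    let m := p.length
    let n := t.length
    if n < m then []
    else
      let combined := p ++ '#' :: t
      let z := computeZ combined
      (List.range' (m + 1) (combined.length - (m + 1))).foldl
        (fun acc i => if z.getD i 0 = m then acc ++ [(i : Int) - (m : Int) - 1] else acc) []

-- ===== PORT B =====
-- Source B: guard, then [i for i in range(len(text) - m + 1) if text[i:i+m] == pattern]
-- (the slice text[i:i+m] has nonnegative in-range bounds, so take/drop is exact)
def z_search_alt (text : String) (pattern : String) : List Int :=
  let p := pattern.toList
  let t := text.toList
  if p = [] ∨ t = [] ∨ t.length < p.length then []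
  else
    (List.range (t.length - p.length + 1)).filterMap
      (fun i => if (t.drop i).take p.length = p then some ((i : Nat) : Int) else none)

-- ===== PRECONDITION & SPEC =====
-- On inputs where some occurrence of the pattern is immediately followed by '#' in the text,
-- A omits exactly those occurrences (its Z-values overshoot its '#' separator), while B
-- returns the full list of occurrence indices, which is the intended answer.
-- one linear pass over the text: is some occurrence of p immediately followed by '#'?
-- (checks each '#' position k for an occurrence of p ending at k; no '#', no slice compare)
def hashScan (t p : List Char) : Bool :=
  t.zipIdx.any (fun ck =>
    ck.1 == '#' && (decide (p.length ≤ ck.2) &&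
      decide ((t.drop (ck.2 - p.length)).take p.length = p)))

def D_z_search (text : String) (pattern : String) : Prop :=
  pattern.toList ≠ [] ∧ hashScan text.toList pattern.toList = true
instance (text : String) (pattern : String) : Decidable (D_z_search text pattern) := by
  unfold D_z_search; infer_instance

def Spec_z_search (text : String) (pattern : String) (out : List Int) : Prop :=
  ¬ D_z_search text pattern → out = z_search_alt text pattern
instance (text : String) (pattern : String) (out : List Int) : Decidable (Spec_z_search text pattern out) := by
  unfold Spec_z_search; infer_instance

def pvDiffWitness_z_search : String × String := ("a#a", "a")
def pvDiffWitnessOut_z_search : (List Int) × (List Int) := ([2], [0, 2])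

-- ===== CLAIM (what is proved, stated in full; the proofs are below) =====
def Claim_unchanged_z_search : Prop := ∀ (text : String) (pattern : String), Dom_z_search text pattern → Spec_z_search text pattern (z_search text pattern)
def Claim_changed_z_search : Prop := Dom_z_search (pvDiffWitness_z_search.1) (pvDiffWitness_z_search.2) ∧ D_z_search (pvDiffWitness_z_search.1) (pvDiffWitness_z_search.2) ∧ z_search (pvDiffWitness_z_search.1) (pvDiffWitness_z_search.2) = pvDiffWitnessOut_z_search.1 ∧ z_search_alt (pvDiffWitness_z_search.1) (pvDiffWitness_z_search.2) = pvDiffWitnessOut_z_search.2 ∧ pvDiffWitnessOut_z_search.1 ≠ pvDiffWitnessOut_z_search.2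
def Claim_exact_z_search : Prop := ∀ (text : String) (pattern : String), Dom_z_search text pattern → D_z_search text pattern → z_search text pattern ≠ z_search_alt text pattern

-- ===== LEMMAS AND PROOFS =====

-- longest common prefix length of two char lists
def lcp : List Char → List Char → Nat
  | a :: as, b :: bs => if a = b then lcp as bs + 1 else 0
  | _, _ => 0

theorem lcp_le_right (a b : List Char) : lcp a b ≤ b.length := by
  induction a generalizing b with
  | nil => simp [lcp]
  | cons x xs ih =>
    cases b with
    | nil => simp [lcp]
    | cons y ys => simp only [lcp]; split <;> simp [ih]

theorem lcp_get (a b : List Char) (t : Nat) (h : t < lcp a b) :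
    a.getD t 'A' = b.getD t 'A' := by
  induction a generalizing b t with
  | nil => simp [lcp] at h
  | cons x xs ih =>
    cases b with
    | nil => simp [lcp] at h
    | cons y ys =>
      simp only [lcp] at h
      split at h
      · cases t with
        | zero => simpa using ‹x = y›
        | succ t' => simpa using ih ys t' (by omega)
      · omega

theorem lcp_mismatch (a b : List Char) (ha : lcp a b < a.length) (hb : lcp a b < b.length) :
    a.getD (lcp a b) 'A' ≠ b.getD (lcp a b) 'A' := by
  induction a generalizing b with
  | nil => simp at ha
  | cons x xs ih =>
    cases b with
    | nil => simp at hb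
    | cons y ys =>
      by_cases hxy : x = y
      · subst hxy
        rw [show lcp (x::xs) (x::ys) = lcp xs ys + 1 from by simp [lcp]] at *
        simpa using ih ys (by simpa using ha) (by simpa using hb)
      · rw [show lcp (x::xs) (y::ys) = 0 from by simp [lcp, hxy]]
        simpa using hxy

theorem le_lcp (a b : List Char) (L : Nat) (ha : L ≤ a.length) (hb : L ≤ b.length)
    (h : ∀ t, t < L → a.getD t 'A' = b.getD t 'A') : L ≤ lcp a b := by
  by_contra hlt
  push_neg at hlt
  exact lcp_mismatch a b (by omega) (by omega) (h _ hlt)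

theorem lcp_le_of_mismatch (a b : List Char) (L : Nat)
    (h : a.getD L 'A' ≠ b.getD L 'A') : lcp a b ≤ L := by
  by_contra hlt
  exact h (lcp_get a b L (by omega))

-- getD through drop
theorem getD_drop (s : List Char) (l t : Nat) :
    (s.drop l).getD t 'A' = s.getD (l + t) 'A' := by
  simp [List.getD_eq_getElem?_getD, List.getElem?_drop]

-- Z-value of s at position i
def Zv (s : List Char) (i : Nat) : Nat := lcp s (s.drop i)

theorem Zv_le (s : List Char) (i : Nat) : Zv s i ≤ s.length - i := by
  simp only [Zv]
  have := lcp_le_right s (s.drop i)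
  simpa [List.length_drop] using this

theorem Zv_get (s : List Char) (i t : Nat) (h : t < Zv s i) :
    s.getD t 'A' = s.getD (i + t) 'A' := by
  have := lcp_get s (s.drop i) t h
  rwa [getD_drop] at this

theorem Zv_mismatch (s : List Char) (i : Nat) (h : i + Zv s i < s.length) :
    s.getD (Zv s i) 'A' ≠ s.getD (i + Zv s i) 'A' := by
  simp only [Zv] at h ⊢
  have := lcp_mismatch s (s.drop i) (by omega) (by simp [List.length_drop]; omega)
  rwa [getD_drop] at this

theorem le_Zv (s : List Char) (i L : Nat) (hL : i + L ≤ s.length)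
    (h : ∀ t, t < L → s.getD t 'A' = s.getD (i + t) 'A') : L ≤ Zv s i := by
  simp only [Zv]
  refine le_lcp _ _ _ (by omega) (by simp [List.length_drop]; omega) ?_
  intro t ht
  rw [getD_drop]
  exact h t ht

-- the inner while loop computes l + Zv s l, given the already-matched span
theorem zextF_spec (s : List Char) (l : Nat) : ∀ (fuel r : Nat), s.length - r ≤ fuel →
    l ≤ r → l ≤ s.length → r - l ≤ Zv s l → zextF s l fuel r = l + Zv s l := by
  intro fuel
  induction fuel with
  | zero =>
    intro r hf hlr hln hm
    have hz := Zv_le s l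
    simp only [zextF]
    omega
  | succ fuel ih =>
    intro r hf hlr hln hm
    have hz := Zv_le s l
    simp only [zextF]
    split
    · rename_i h
      have hnext : r + 1 - l ≤ Zv s l := by
        by_contra hc
        have hze : Zv s l = r - l := by omega
        have hmis := Zv_mismatch s l (by omega)
        rw [hze] at hmis
        have hlr' : l + (r - l) = r := by omega
        rw [hlr'] at hmis
        exact hmis h.2
      exact ih (r + 1) (by omega) (by omega) hln hnext
    · rename_i h
      rw [Decidable.not_and_iff_not_or_not] at h
      rcases h with h | h
      · omega
      · push_neg at h
        have hmis : s.getD (r - l) 'A' ≠ (s.drop l).getD (r - l) 'A' := by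
          rwa [getD_drop, Nat.add_sub_cancel' hlr]
        have hle := lcp_le_of_mismatch s (s.drop l) (r - l) hmis
        have hle' : Zv s l ≤ r - l := hle
        omega

theorem zext_spec (s : List Char) (l r : Nat) (hlr : l ≤ r) (hln : l ≤ s.length)
    (hm : r - l ≤ Zv s l) : zext s l r = l + Zv s l :=
  zextF_spec s l (s.length - r) r le_rfl hlr hln hm

-- loop invariant for compute_z_function's main loop
def ZInv (s : List Char) (st : List Nat × Nat × Nat) (i : Nat) : Prop :=
  let z := st.1; let l := st.2.1; let r := st.2.2
  z.length = s.length ∧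
  z.getD 0 0 = s.length ∧
  (∀ j, 1 ≤ j → j < i → z.getD j 0 = Zv s j) ∧
  ((l = 0 ∧ r = 0) ∨ (1 ≤ l ∧ l < i)) ∧
  r < s.length ∧
  (∀ t, t < r + 1 - l → s.getD t 'A' = s.getD (l + t) 'A')

theorem getD_set_self (z : List Nat) (i v : Nat) (h : i < z.length) :
    (z.set i v).getD i 0 = v := by
  simp [List.getD_eq_getElem?_getD, h]

theorem getD_set_ne (z : List Nat) (i j v : Nat) (h : i ≠ j) :
    (z.set i v).getD j 0 = z.getD j 0 := by
  simp [List.getD_eq_getElem?_getD, List.getElem?_set_ne h]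

theorem zstep_inv (s : List Char) (st : List Nat × Nat × Nat) (i : Nat)
    (h1 : 1 ≤ i) (hin : i < s.length) (hI : ZInv s st i) :
    ZInv s (zstep s st i) (i + 1) := by
  obtain ⟨z, l, r⟩ := st
  unfold ZInv at hI
  dsimp only at hI
  obtain ⟨hlen, h0, hz, hl, hr, hw⟩ := hI
  unfold zstep
  dsimp only
  by_cases hri : r < i
  · -- branch 1: start fresh at i
    rw [if_pos hri]
    unfold ZInv
    dsimp only
    have he : zext s i i = i + Zv s i := zext_spec s i i le_rfl (by omega) (by omega)
    have hzle := Zv_le s i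
    refine ⟨by simpa using hlen, ?_, ?_, Or.inr ⟨by omega, by omega⟩, by omega, ?_⟩
    · rw [getD_set_ne _ _ _ _ (by omega)]; exact h0
    · intro j hj1 hji
      by_cases hji' : j = i
      · subst hji'; rw [getD_set_self _ _ _ (by omega), he]; omega
      · rw [getD_set_ne _ _ _ _ (by omega)]; exact hz j hj1 (by omega)
    · intro t ht
      rw [he] at ht
      exact Zv_get s i t (by omega)
  · -- i within the window
    rw [if_neg hri]
    have hir : i ≤ r := by omega
    have hl' : 1 ≤ l ∧ l < i := by
      rcases hl with ⟨h0', hr0⟩ | h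
      · omega
      · exact h
    set k := i - l with hk
    have hk1 : 1 ≤ k := by omega
    have hki : k < i := by omega
    have hzk : z.getD k 0 = Zv s k := hz k hk1 hki
    by_cases hcase : z.getD k 0 < r - i + 1
    · rw [if_pos hcase]
      unfold ZInv
      dsimp only
      rw [hzk] at hcase
      have hzv : Zv s i = Zv s k := by
        have hle1 : Zv s k ≤ Zv s i := by
          refine le_Zv s i (Zv s k) (by omega) ?_
          intro t ht
          have h1' : s.getD (k + t) 'A' = s.getD (l + (k + t)) 'A' := hw (k + t) (by omega)
          have h2' : s.getD t 'A' = s.getD (k + t) 'A' := Zv_get s k t ht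
          have hidx : l + (k + t) = i + t := by omega
          rw [hidx] at h1'
          rw [h2', h1']
        have hle2 : Zv s i ≤ Zv s k := by
          by_contra hc
          push_neg at hc
          have hmis := Zv_mismatch s k (by omega)
          have h1' : s.getD (Zv s k) 'A' = s.getD (i + Zv s k) 'A' := Zv_get s i _ hc
          have h2' : s.getD (k + Zv s k) 'A' = s.getD (l + (k + Zv s k)) 'A' :=
            hw (k + Zv s k) (by omega)
          have hidx : l + (k + Zv s k) = i + Zv s k := by omega
          rw [hidx] at h2'
          exact hmis (by rw [h1', h2'])
        omega
      refine ⟨by simpa using hlen, ?_, ?_, Or.inr ⟨by omega, by omega⟩, hr, hw⟩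
      · rw [getD_set_ne _ _ _ _ (by omega)]; exact h0
      · intro j hj1 hji
        by_cases hji' : j = i
        · subst hji'; rw [getD_set_self _ _ _ (by omega), hzk, hzv]
        · rw [getD_set_ne _ _ _ _ (by omega)]; exact hz j hj1 (by omega)
    · rw [if_neg hcase]
      unfold ZInv
      dsimp only
      rw [hzk] at hcase
      push_neg at hcase
      have hmatch : ∀ t, t < r + 1 - i → s.getD t 'A' = s.getD (i + t) 'A' := by
        intro t ht
        have h1' : s.getD (k + t) 'A' = s.getD (l + (k + t)) 'A' := hw (k + t) (by omega)
        have h2' : s.getD t 'A' = s.getD (k + t) 'A' := Zv_get s k t (by omega)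
        have hidx : l + (k + t) = i + t := by omega
        rw [hidx] at h1'
        rw [h2', h1']
      have hzge : r - i ≤ Zv s i :=
        le_trans (by omega) (le_Zv s i (r + 1 - i) (by omega) hmatch)
      have he : zext s i r = i + Zv s i := zext_spec s i r hir (by omega) (by omega)
      have hzle := Zv_le s i
      refine ⟨by simpa using hlen, ?_, ?_, Or.inr ⟨by omega, by omega⟩, by omega, ?_⟩
      · rw [getD_set_ne _ _ _ _ (by omega)]; exact h0
      · intro j hj1 hji
        by_cases hji' : j = i
        · subst hji'; rw [getD_set_self _ _ _ (by omega), he]; omega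
        · rw [getD_set_ne _ _ _ _ (by omega)]; exact hz j hj1 (by omega)
      · intro t ht
        rw [he] at ht
        exact Zv_get s i t (by omega)

theorem zfold_inv (s : List Char) (c : Nat) : ∀ (i : Nat) (st : List Nat × Nat × Nat),
    1 ≤ i → i + c ≤ s.length → ZInv s st i →
    ZInv s ((List.range' i c).foldl (zstep s) st) (i + c) := by
  induction c with
  | zero => intro i st _ _ h; simpa using h
  | succ c ih =>
    intro i st h1 hc hI
    rw [List.range'_succ, List.foldl_cons]
    have := ih (i + 1) (zstep s st i) (by omega) (by omega)
      (zstep_inv s st i h1 (by omega) hI)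
    simpa [Nat.add_assoc, Nat.add_comm 1 c] using this

theorem computeZ_spec (s : List Char) (hs : s ≠ []) :
    ∀ j, 1 ≤ j → j < s.length → (computeZ s).getD j 0 = Zv s j := by
  have hn : 1 ≤ s.length := by
    cases s with
    | nil => simp at hs
    | cons a l => simp
  have hinit : ZInv s ((List.replicate s.length 0).set 0 s.length, 0, 0) 1 := by
    unfold ZInv
    dsimp only
    refine ⟨by simp, ?_, by intro j hj1 hj2; omega, Or.inl ⟨rfl, rfl⟩, by omega, ?_⟩
    · rw [getD_set_self _ _ _ (by simpa using hn)]
    · intro t ht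
      have ht0 : t = 0 := by omega
      simp [ht0]
  have hfin := zfold_inv s (s.length - 1) 1 _ le_rfl (by omega) hinit
  rw [show 1 + (s.length - 1) = s.length by omega] at hfin
  obtain ⟨_, _, hz, _⟩ := hfin
  exact hz

-- occurrence predicate (B's comprehension condition, as a Bool)
def occAt (t p : List Char) (j : Nat) : Bool := decide ((t.drop j).take p.length = p)

theorem occAt_length (t p : List Char) (j : Nat) (hp : 0 < p.length) (h : occAt t p j = true) :
    j + p.length ≤ t.length := by
  simp only [occAt, decide_eq_true_eq] at h
  have := congrArg List.length h
  rw [List.length_take, List.length_drop] at this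
  omega

theorem occAt_get (t p : List Char) (j : Nat) (h : occAt t p j = true) :
    ∀ x, x < p.length → p.getD x 'A' = t.getD (j + x) 'A' := by
  intro x hx
  simp only [occAt, decide_eq_true_eq] at h
  have := congrArg (fun w => w.getD x 'A') h
  simp only [List.getD_eq_getElem?_getD, List.getElem?_take, List.getElem?_drop] at this
  rw [if_pos hx] at this
  exact this.symm

theorem occAt_of_get (t p : List Char) (j : Nat) (hlen : j + p.length ≤ t.length)
    (h : ∀ x, x < p.length → p.getD x 'A' = t.getD (j + x) 'A') : occAt t p j = true := by
  simp only [occAt, decide_eq_true_eq]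
  apply List.ext_getElem
  · simp [List.length_take, List.length_drop]; omega
  · intro x h1 h2
    have hx : x < p.length := h2
    have hh := h x hx
    simp only [List.getD_eq_getElem?_getD] at hh
    rw [List.getElem?_eq_getElem (by omega), List.getElem?_eq_getElem (by omega)] at hh
    simp only [Option.getD_some] at hh
    simp only [List.getElem_take, List.getElem_drop]
    exact hh.symm

-- characterization of the Z-value of "p ++ '#' :: t" at positions inside the text part
theorem Zcomb (t p : List Char) (j : Nat) (hp : p ≠ []) (hj : j < t.length) :
    (Zv (p ++ '#' :: t) (p.length + 1 + j) = p.length) ↔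
      (occAt t p j = true ∧
        (j + p.length = t.length ∨ t.getD (j + p.length) 'A' ≠ '#')) := by
  have hp0 : 0 < p.length := List.length_pos_iff.mpr hp
  set s := p ++ '#' :: t with hs
  set m := p.length with hm
  set i := m + 1 + j with hi
  have hslen : s.length = m + 1 + t.length := by simp [hs, hm]; omega
  have hdrop : ∀ x, s.getD (i + x) 'A' = t.getD (j + x) 'A' := by
    intro x
    simp only [hs, hi, List.getD_eq_getElem?_getD]
    rw [List.getElem?_append_right (by omega)]
    rw [show m + 1 + j + x - p.length = (j + x) + 1 by omega]
    simp
  have hpref : ∀ x, x < m → s.getD x 'A' = p.getD x 'A' := by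
    intro x hx
    simp only [hs, List.getD_eq_getElem?_getD]
    rw [List.getElem?_append_left (by omega)]
  have hhash : s.getD m 'A' = '#' := by
    simp only [hs, List.getD_eq_getElem?_getD]
    rw [List.getElem?_append_right (by omega)]
    simp [hm]
  constructor
  · intro hz
    have hocc : occAt t p j = true := by
      refine occAt_of_get t p j (by have := Zv_le s i; omega) ?_
      intro x hx
      calc p.getD x 'A' = s.getD x 'A' := (hpref x (by omega)).symm
        _ = s.getD (i + x) 'A' := Zv_get s i x (by omega)
        _ = t.getD (j + x) 'A' := hdrop x
    refine ⟨hocc, ?_⟩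
    by_cases hend : j + m = t.length
    · exact Or.inl (by omega)
    · refine Or.inr ?_
      have hjm := occAt_length t p j hp0 hocc
      have hmis := Zv_mismatch s i (by omega)
      rw [hz, hhash] at hmis
      intro hc
      apply hmis
      rw [hdrop m]
      exact hc.symm
  · rintro ⟨hocc, hend⟩
    have hjm : j + m ≤ t.length := occAt_length t p j hp0 hocc
    have hge : m ≤ Zv s i := by
      refine le_Zv s i m (by omega) ?_
      intro x hx
      calc s.getD x 'A' = p.getD x 'A' := hpref x hx
        _ = t.getD (j + x) 'A' := occAt_get t p j hocc x hx
        _ = s.getD (i + x) 'A' := (hdrop x).symm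
    have hle : Zv s i ≤ m := by
      rcases hend with hend | hend
      · have := Zv_le s i; omega
      · by_contra hc
        push_neg at hc
        have hzg := Zv_get s i m hc
        rw [hhash, hdrop m] at hzg
        exact hend hzg.symm
    omega

-- A's filter condition as a Bool over text indices
def acond (t p : List Char) (j : Nat) : Bool :=
  decide (occAt t p j = true ∧
    (j + p.length = t.length ∨ t.getD (j + p.length) 'A' ≠ '#'))

-- the port's prop-valued `if`, bridged to PySem.List.foldl_append_if
theorem foldl_append_if_prop {α β : Type} (P : α → Prop) [DecidablePred P] (f : α → β)
    (l : List α) (acc : List β) :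
    l.foldl (fun acc x => if P x then acc ++ [f x] else acc) acc
      = acc ++ (l.filter (fun x => decide (P x))).map f := by
  have h := PySem.List.foldl_append_if (fun x => decide (P x)) f l acc
  simpa using h

theorem filterMap_if_prop {α β : Type} (P : α → Prop) [DecidablePred P] (f : α → β)
    (l : List α) :
    l.filterMap (fun x => if P x then some (f x) else none)
      = (l.filter (fun x => decide (P x))).map f := by
  induction l with
  | nil => rfl
  | cons a l ih =>
    by_cases h : P a
    · simp [h, ih]
    · simp [h, ih]

-- what A's fold computes on the guarded domain
theorem A_fold (t p : List Char) (hp : p ≠ []) (hmn : p.length ≤ t.length) :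
    (List.range' (p.length + 1) ((p ++ '#' :: t).length - (p.length + 1))).foldl
      (fun acc i => if (computeZ (p ++ '#' :: t)).getD i 0 = p.length then
        acc ++ [(i : Int) - (p.length : Int) - 1] else acc) []
    = ((List.range t.length).filter (acond t p)).map (fun (j : Nat) => (j : Int)) := by
  have hm1 : 0 < p.length := List.length_pos_iff.mpr hp
  have hslen : (p ++ '#' :: t).length = p.length + 1 + t.length := by simp; omega
  have hs0 : p ++ '#' :: t ≠ [] := by simp
  rw [show (p ++ '#' :: t).length - (p.length + 1) = t.length by omega]
  rw [foldl_append_if_prop (P := fun i => (computeZ (p ++ '#' :: t)).getD i 0 = p.length)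
    (f := fun i => (i : Int) - (p.length : Int) - 1)]
  rw [List.nil_append, List.range'_eq_map_range, List.filter_map, List.map_map]
  have hzz := computeZ_spec (p ++ '#' :: t) hs0
  have h1 : (List.range t.length).filter
      ((fun i => decide ((computeZ (p ++ '#' :: t)).getD i 0 = p.length)) ∘ (p.length + 1 + ·))
      = (List.range t.length).filter (acond t p) := by
    apply List.filter_congr
    intro j hj
    have hjn : j < t.length := List.mem_range.mp hj
    simp only [Function.comp]
    rw [hzz (p.length + 1 + j) (by omega) (by rw [hslen]; omega)]
    exact decide_eq_decide.mpr (Zcomb t p j hp hjn)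
  rw [h1]
  apply List.map_eq_map_iff.mpr
  intro j _
  simp only [Function.comp]
  push_cast
  ring

theorem A_eq (text pattern : String) (hp : pattern.toList ≠ []) (ht : text.toList ≠ [])
    (hmn : pattern.toList.length ≤ text.toList.length) :
    z_search text pattern =
      ((List.range text.toList.length).filter (acond text.toList pattern.toList)).map
        (fun (j : Nat) => (j : Int)) := by
  unfold z_search
  dsimp only
  rw [if_neg (by push_neg; exact ⟨hp, ht⟩), if_neg (by omega)]
  exact A_fold text.toList pattern.toList hp hmn

theorem B_eq (text pattern : String) (hp : pattern.toList ≠ []) (ht : text.toList ≠ [])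
    (hmn : pattern.toList.length ≤ text.toList.length) :
    z_search_alt text pattern =
      ((List.range (text.toList.length - pattern.toList.length + 1)).filter
        (occAt text.toList pattern.toList)).map (fun (j : Nat) => (j : Int)) := by
  unfold z_search_alt
  dsimp only
  rw [if_neg (by push_neg; exact ⟨hp, ht, by omega⟩)]
  rw [filterMap_if_prop
    (P := fun i => (text.toList.drop i).take pattern.toList.length = pattern.toList)
    (f := fun i => ((i : Nat) : Int))]
  rfl

theorem occAt_false_beyond (t p : List Char) (j : Nat) (hp : 0 < p.length)
    (h : t.length < j + p.length) : occAt t p j = false := by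
  by_contra hc
  have := occAt_length t p j hp (by simpa using hc)
  omega

theorem filter_occ_extend (t p : List Char) (hm1 : 1 ≤ p.length) (hmn : p.length ≤ t.length) :
    (List.range t.length).filter (occAt t p) =
      (List.range (t.length - p.length + 1)).filter (occAt t p) := by
  conv_lhs => rw [show t.length = (t.length - p.length + 1) + (p.length - 1) by omega]
  rw [List.range_add, List.filter_append]
  have h2 : ((List.range (p.length - 1)).map ((t.length - p.length + 1) + ·)).filter
      (occAt t p) = [] := by
    apply List.filter_eq_nil_iff.mpr
    intro j hj
    obtain ⟨x, hx, rfl⟩ := List.mem_map.mp hj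
    have hx' := List.mem_range.mp hx
    simp [occAt_false_beyond t p (t.length - p.length + 1 + x) hm1 (by omega)]
  rw [h2, List.append_nil]

theorem countP_lt_of_strict (p q : Nat → Bool) (l : List Nat)
    (hpq : ∀ x ∈ l, p x = true → q x = true) (x0 : Nat) (hx0 : x0 ∈ l)
    (hq : q x0 = true) (hp : p x0 = false) : l.countP p < l.countP q := by
  induction l with
  | nil => simp at hx0
  | cons a l ih =>
    rw [List.countP_cons, List.countP_cons]
    rcases List.mem_cons.mp hx0 with rfl | hmem
    · have hle := List.countP_mono_left (l := l) (p := p) (q := q)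
        (fun x hx => hpq x (List.mem_cons_of_mem _ hx))
      simp [hp, hq]
      omega
    · have hlt := ih (fun x hx hpx => hpq x (List.mem_cons_of_mem _ hx) hpx) hmem
      have hcases : (if p a = true then 1 else 0) ≤ (if q a = true then 1 else 0) := by
        by_cases hpa : p a = true
        · simp [hpa, hpq a (List.mem_cons_self) hpa]
        · simp [hpa]
      omega

-- D's scan ⟷ an occurrence immediately followed by '#'
theorem occ_of_hash (t p : List Char) (h : hashScan t p = true) :
    ∃ j, j + p.length < t.length ∧ occAt t p j = true ∧ t.getD (j + p.length) 'A' = '#' := by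
  obtain ⟨⟨c, k⟩, hmem, hpred⟩ := List.any_eq_true.mp h
  simp only [Bool.and_eq_true, beq_iff_eq, decide_eq_true_eq] at hpred
  obtain ⟨hc, hk, htake⟩ := hpred
  subst hc
  have hget : t[k]? = some '#' := List.mk_mem_zipIdx_iff_getElem?.mp hmem
  have hkn : k < t.length := by
    by_contra hc'
    rw [List.getElem?_eq_none (by omega)] at hget
    simp at hget
  refine ⟨k - p.length, by omega, ?_, ?_⟩
  · simp only [occAt, decide_eq_true_eq]
    exact htake
  · rw [show k - p.length + p.length = k by omega]
    rw [List.getD_eq_getElem?_getD, hget]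
    rfl

theorem hash_of_occ (t p : List Char) (j : Nat) (hjm : j + p.length < t.length)
    (hocc : occAt t p j = true) (hh : t.getD (j + p.length) 'A' = '#') :
    hashScan t p = true := by
  apply List.any_eq_true.mpr
  refine ⟨('#', j + p.length), ?_, ?_⟩
  · apply List.mk_mem_zipIdx_iff_getElem?.mpr
    rw [List.getElem?_eq_getElem (by omega)]
    rw [List.getD_eq_getElem?_getD, List.getElem?_eq_getElem (by omega)] at hh
    simpa using hh
  · simp only [Bool.and_eq_true, beq_iff_eq, decide_eq_true_eq]
    refine ⟨by simp, by omega, ?_⟩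
    rw [show j + p.length - p.length = j by omega]
    simpa [occAt] using hocc

-- ===== VERDICT (by name: the statement is the Claim_ definition above) =====
theorem z_search_spec : Claim_unchanged_z_search := by
  intro text pattern _ hD
  by_cases hp : pattern.toList = []
  · unfold z_search z_search_alt
    dsimp only
    rw [if_pos (Or.inl hp), if_pos (Or.inl hp)]
  by_cases ht : text.toList = []
  · unfold z_search z_search_alt
    dsimp only
    rw [if_pos (Or.inr ht), if_pos (Or.inr (Or.inl ht))]
  by_cases hmn : text.toList.length < pattern.toList.length
  · unfold z_search z_search_alt
    dsimp only
    rw [if_neg (by push_neg; exact ⟨hp, ht⟩), if_pos hmn, if_pos (Or.inr (Or.inr hmn))]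
  push_neg at hmn
  rw [A_eq text pattern hp ht hmn, B_eq text pattern hp ht hmn]
  rw [← filter_occ_extend text.toList pattern.toList
    (List.length_pos_iff.mpr hp) hmn]
  congr 1
  apply List.filter_congr
  intro j hj
  have hjn : j < text.toList.length := List.mem_range.mp hj
  by_cases ho : occAt text.toList pattern.toList j = true
  · have hend : j + pattern.toList.length = text.toList.length ∨
        text.toList.getD (j + pattern.toList.length) 'A' ≠ '#' := by
      by_contra hc
      push_neg at hc
      obtain ⟨hc1, hc2⟩ := hc
      have hjm := occAt_length text.toList pattern.toList j (List.length_pos_iff.mpr hp) ho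
      exact hD ⟨hp, hash_of_occ text.toList pattern.toList j (by omega) ho hc2⟩
    unfold acond
    rw [decide_eq_true ⟨ho, hend⟩, ho]
  · have ho' : occAt text.toList pattern.toList j = false := by simpa using ho
    unfold acond
    simp [ho']

theorem z_search_changed : Claim_changed_z_search := by
  unfold Claim_changed_z_search; decide

theorem z_search_tight : Claim_exact_z_search := by
  intro text pattern _ hD
  obtain ⟨hp, hinf⟩ := hD
  obtain ⟨j0, hj0m, hocc0, hhash0⟩ := occ_of_hash text.toList pattern.toList hinf
  have hm1 : 0 < pattern.toList.length := List.length_pos_iff.mpr hp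
  have ht : text.toList ≠ [] := by
    intro h
    rw [h] at hj0m
    simp at hj0m
  have hmn : pattern.toList.length ≤ text.toList.length := by omega
  rw [A_eq text pattern hp ht hmn, B_eq text pattern hp ht hmn]
  intro heq
  have hlen := congrArg List.length heq
  rw [← filter_occ_extend text.toList pattern.toList hm1 hmn] at hlen
  rw [List.length_map, List.length_map, ← List.countP_eq_length_filter,
    ← List.countP_eq_length_filter] at hlen
  have hstrict : (List.range text.toList.length).countP (acond text.toList pattern.toList) <
      (List.range text.toList.length).countP (occAt text.toList pattern.toList) := by
    refine countP_lt_of_strict _ _ _ ?_ j0 (List.mem_range.mpr (by omega)) hocc0 ?_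
    · intro x _ hx
      unfold acond at hx
      simp only [decide_eq_true_eq] at hx
      exact hx.1
    · unfold acond
      simp only [decide_eq_false_iff_not]
      intro hc
      exact hc.2.elim (by omega) (fun h => h hhash0)
  omega
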